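-- pv_equiv track=rewrite | github.com/pypi-data/pypi-mirror-379 | packages/surframe/surframe-0.1.5-py3-none-any.whl/surframe/indexes/minmax.py | build_minmax_index
-- ===== SOURCE A (Python) =====
-- from typing import Any, Dict, Iterable, List, Tuple
--
-- def build_minmax_index(values_by_chunk: Dict[str, Iterable[Any]]) -> Dict[str, Tuple[Any, Any]]:
--     """
--     Recibe: {chunk_id: iterable_de_valores}
--     Devuelve: {chunk_id: (min, max)}
--     """
--     index: Dict[str, Tuple[Any, Any]] = {}
--     for cid, it in values_by_chunk.items():
--         vlist = list(it)
--         if not vlist: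
--             continue
--         index[cid] = (min(vlist), max(vlist))
--     return index
-- ===== SOURCE B (Python) =====
-- from typing import Any, Dict, Iterable, Tuple
--
-- def build_minmax_index(values_by_chunk: Dict[str, Iterable[Any]]) -> Dict[str, Tuple[Any, Any]]:
--     index: Dict[str, Tuple[Any, Any]] = {}
--     for cid, it in values_by_chunk.items():
--         have = False
--         for x in it:
--             if not have:
--                 cur_min = cur_max = x
--                 have = True
--             else:
--                 if x < cur_min:
--                     cur_min = x
--                 if x > cur_max:
--                     cur_max = x
--         if have:
--             index[cid] = (cur_min, cur_max)
--     return index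
-- ===== Notes on version B (the rewrite author's own statement) =====
-- stated objective: alternative
-- what changed: Instead of materializing list(it) and scanning it twice with min() and max(), B streams each chunk once, seeding two accumulators from the first element and updating them with comparisons.
import Mathlib
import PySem

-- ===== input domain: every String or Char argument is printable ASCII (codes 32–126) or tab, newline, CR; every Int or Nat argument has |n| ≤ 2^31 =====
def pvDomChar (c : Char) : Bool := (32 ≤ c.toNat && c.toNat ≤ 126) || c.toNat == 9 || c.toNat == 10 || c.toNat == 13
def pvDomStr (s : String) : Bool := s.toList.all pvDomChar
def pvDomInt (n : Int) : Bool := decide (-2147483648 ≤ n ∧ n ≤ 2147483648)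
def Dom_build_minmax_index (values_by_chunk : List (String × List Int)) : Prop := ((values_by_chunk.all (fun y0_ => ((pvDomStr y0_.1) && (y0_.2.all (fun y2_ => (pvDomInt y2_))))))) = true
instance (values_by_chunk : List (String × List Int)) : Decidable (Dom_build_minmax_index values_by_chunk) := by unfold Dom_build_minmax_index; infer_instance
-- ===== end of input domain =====

-- B replaces A's list(it) + min() + max() (three passes per chunk) with a single
-- streaming pass keeping two accumulators seeded from the first element.
-- ===== PORT A =====
def build_minmax_index (values_by_chunk : List (String × List Int)) : List (String × Int × Int) :=
  (values_by_chunk.foldl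
    (fun (index : PySem.Dict String (Int × Int)) p =>
      let vlist := p.2
      if vlist = [] then index
      else
        match PySem.List.min? vlist (fun x => x), PySem.List.max? vlist (fun x => x) with
        | some mn, some mx => index.insert p.1 (mn, mx)
        | _, _ => index)  -- unreachable: vlist ≠ []
    PySem.Dict.empty).items

-- ===== PORT B =====
def build_minmax_index_alt (values_by_chunk : List (String × List Int)) : List (String × Int × Int) :=
  (values_by_chunk.foldl
    (fun (index : PySem.Dict String (Int × Int)) p =>
      -- one pass over the chunk: None = nothing seen yet, Some (cur_min, cur_max)
      match p.2.foldl
          (fun st x =>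
            match st with
            | none => some (x, x)
            | some (mn, mx) => some ((if x < mn then x else mn), (if x > mx then x else mx)))
          none with
      | none => index
      | some mm => index.insert p.1 mm)
    PySem.Dict.empty).items

-- ===== PRECONDITION & SPEC =====
def Spec_build_minmax_index (values_by_chunk : List (String × List Int)) (out : List (String × Int × Int)) : Prop := out = build_minmax_index_alt values_by_chunk
instance (values_by_chunk : List (String × List Int)) (out : List (String × Int × Int)) : Decidable (Spec_build_minmax_index values_by_chunk out) := by unfold Spec_build_minmax_index; infer_instance

-- ===== CLAIM (what is proved, stated in full; the proofs are below) =====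
def Claim_equal_build_minmax_index : Prop := ∀ (values_by_chunk : List (String × List Int)), Dom_build_minmax_index values_by_chunk → Spec_build_minmax_index values_by_chunk (build_minmax_index values_by_chunk)

-- ===== LEMMAS AND PROOFS =====

-- B's Option-state scan, once seeded, is the pair of running fold accumulators
theorem pv_scan_some (t : List Int) (a b : Int) :
    t.foldl
      (fun st x =>
        match st with
        | none => some (x, x)
        | some (mn, mx) => some ((if x < mn then x else mn), (if x > mx then x else mx)))
      (some (a, b))
    = some (t.foldl (fun m v => if v < m then v else m) a,
            t.foldl (fun m v => if v > m then v else m) b) := by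
  induction t generalizing a b with
  | nil => rfl
  | cons x t ih => simp only [List.foldl_cons]; exact ih _ _

theorem pv_minstep : (fun (m v : Int) => if v < m then v else m) = (fun m v => min m v) := by
  funext m v; by_cases h : v < m <;> simp [min_def] <;> omega

theorem pv_maxstep : (fun (m v : Int) => if v > m then v else m) = (fun m v => max m v) := by
  funext m v; by_cases h : v > m <;> simp [max_def] <;> omega

-- ===== VERDICT (by name: the statement is the Claim_ definition above) =====
theorem build_minmax_index_spec : Claim_equal_build_minmax_index := by
  intro v _
  unfold Spec_build_minmax_index build_minmax_index build_minmax_index_alt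
  congr 1
  apply PySem.List.foldl_congr_mem
  intro index p _
  cases p with
  | mk cid l =>
    cases l with
    | nil => rfl
    | cons x t =>
      simp only [List.foldl_cons, pv_scan_some,
        PySem.List.min?_id_cons, PySem.List.max?_id_cons,
        pv_minstep, pv_maxstep]
      simp
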